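-- pv_equiv track=rewrite | github.com/jhsuwm/sprint2code | backend/services/jira_service.py | identify_attachment_type
-- ===== SOURCE A (Python) =====
-- from typing import List, Dict, Any, Optional, Tuple
--
-- def identify_attachment_type(attachment: Dict[str, Any]) -> str:
--     """
--     Identify the type of attachment based on MIME type and filename.
--
--     Args:
--         attachment: Attachment metadata dict with 'mimeType' and 'filename' keys
--
--     Returns:
--         One of: 'text', 'pdf', 'image', 'other'
--     """
--     mime_type = attachment.get("mimeType", "").lower()
--     filename = attachment.get("filename", "").lower()
--
--     # Check for text files
--     text_mimes = [
--         "text/plain", "text/markdown", "text/csv", "text/html",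
--         "application/json", "application/xml", "text/xml"
--     ]
--     text_extensions = [".txt", ".md", ".csv", ".json", ".xml", ".yaml", ".yml", ".log"]
--
--     if mime_type in text_mimes or any(filename.endswith(ext) for ext in text_extensions):
--         return "text"
--
--     # Check for PDF files
--     if mime_type == "application/pdf" or filename.endswith(".pdf"):
--         return "pdf"
--
--     # Check for image files
--     image_mimes = ["image/png", "image/jpeg", "image/jpg", "image/gif", "image/webp", "image/bmp"]
--     image_extensions = [".png", ".jpg", ".jpeg", ".gif", ".webp", ".bmp"]
--
--     if mime_type in image_mimes or any(filename.endswith(ext) for ext in image_extensions):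
--         return "image"
--
--     return "other"
-- ===== SOURCE B (Python) =====
-- _MIME_CATEGORY = {
--     "text/plain": "text", "text/markdown": "text", "text/csv": "text",
--     "text/html": "text", "application/json": "text", "application/xml": "text",
--     "text/xml": "text",
--     "application/pdf": "pdf",
--     "image/png": "image", "image/jpeg": "image", "image/jpg": "image",
--     "image/gif": "image", "image/webp": "image", "image/bmp": "image",
-- }
--
-- _EXT_CATEGORY = [
--     (".txt", "text"), (".md", "text"), (".csv", "text"), (".json", "text"),
--     (".xml", "text"), (".yaml", "text"), (".yml", "text"), (".log", "text"),
--     (".pdf", "pdf"),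
--     (".png", "image"), (".jpg", "image"), (".jpeg", "image"),
--     (".gif", "image"), (".webp", "image"), (".bmp", "image"),
-- ]
--
-- _PRIORITY = ["text", "pdf", "image"]
--
--
-- def identify_attachment_type(attachment):
--     mime_type = attachment.get("mimeType", "").lower()
--     filename = attachment.get("filename", "").lower()
--     mime_cat = _MIME_CATEGORY.get(mime_type)
--     ext_cat = next((cat for ext, cat in _EXT_CATEGORY if filename.endswith(ext)), None)
--     return next((cat for cat in _PRIORITY if cat in (mime_cat, ext_cat)), "other")
-- ===== Notes on version B (the rewrite author's own statement) =====
-- stated objective: alternative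
-- what changed: Replaces A's three sequential if/return blocks with a data-driven lookup: a mime->category dict and an ordered extension->category table are each consulted once, and the result is the first category in the fixed priority order ['text','pdf','image'] that either lookup produced, defaulting to 'other'.
import Mathlib
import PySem

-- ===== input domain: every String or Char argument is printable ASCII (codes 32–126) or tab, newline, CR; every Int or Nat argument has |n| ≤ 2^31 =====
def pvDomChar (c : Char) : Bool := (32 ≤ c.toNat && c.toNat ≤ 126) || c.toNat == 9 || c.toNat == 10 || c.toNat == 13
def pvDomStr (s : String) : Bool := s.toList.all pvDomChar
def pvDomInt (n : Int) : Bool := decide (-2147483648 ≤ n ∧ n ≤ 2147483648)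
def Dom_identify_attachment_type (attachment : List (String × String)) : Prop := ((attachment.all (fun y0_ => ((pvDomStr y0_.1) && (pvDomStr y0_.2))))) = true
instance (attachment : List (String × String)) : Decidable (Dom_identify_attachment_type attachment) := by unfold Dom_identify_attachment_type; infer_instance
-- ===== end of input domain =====

-- B replaces A's three sequential if/return blocks with two table lookups (mime->category, extension->category) selected by a fixed priority order; alternative decomposition, same cost.

-- ===== PORT A =====
def identify_attachment_type (attachment : List (String × String)) : String :=
  let mime_type := PySem.Str.lower (PySem.Dict.getD (PySem.Dict.mk attachment) "mimeType" "")
  let filename := PySem.Str.lower (PySem.Dict.getD (PySem.Dict.mk attachment) "filename" "")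
  let text_mimes := ["text/plain", "text/markdown", "text/csv", "text/html",
    "application/json", "application/xml", "text/xml"]
  let text_extensions := [".txt", ".md", ".csv", ".json", ".xml", ".yaml", ".yml", ".log"]
  if text_mimes.contains mime_type || text_extensions.any (fun ext => PySem.Str.endswith filename ext) then
    "text"
  else if mime_type == "application/pdf" || PySem.Str.endswith filename ".pdf" then
    "pdf"
  else
    let image_mimes := ["image/png", "image/jpeg", "image/jpg", "image/gif", "image/webp", "image/bmp"]
    let image_extensions := [".png", ".jpg", ".jpeg", ".gif", ".webp", ".bmp"]
    if image_mimes.contains mime_type || image_extensions.any (fun ext => PySem.Str.endswith filename ext) then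
      "image"
    else
      "other"

-- ===== PORT B =====
def pvMimeCategory : PySem.Dict String String := PySem.Dict.mk
  [("text/plain", "text"), ("text/markdown", "text"), ("text/csv", "text"),
   ("text/html", "text"), ("application/json", "text"), ("application/xml", "text"),
   ("text/xml", "text"),
   ("application/pdf", "pdf"),
   ("image/png", "image"), ("image/jpeg", "image"), ("image/jpg", "image"),
   ("image/gif", "image"), ("image/webp", "image"), ("image/bmp", "image")]

def pvExtCategory : List (String × String) :=
  [(".txt", "text"), (".md", "text"), (".csv", "text"), (".json", "text"),
   (".xml", "text"), (".yaml", "text"), (".yml", "text"), (".log", "text"),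
   (".pdf", "pdf"),
   (".png", "image"), (".jpg", "image"), (".jpeg", "image"),
   (".gif", "image"), (".webp", "image"), (".bmp", "image")]

def pvPriority : List String := ["text", "pdf", "image"]

def identify_attachment_type_alt (attachment : List (String × String)) : String :=
  let mime_type := PySem.Str.lower (PySem.Dict.getD (PySem.Dict.mk attachment) "mimeType" "")
  let filename := PySem.Str.lower (PySem.Dict.getD (PySem.Dict.mk attachment) "filename" "")
  let mime_cat := PySem.Dict.get? pvMimeCategory mime_type
  let ext_cat := (pvExtCategory.find? (fun p => PySem.Str.endswith filename p.1)).map (·.2)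
  -- 'cat in (mime_cat, ext_cat)' is tuple membership: the two-way disjunction
  ((pvPriority.find? (fun cat => mime_cat == some cat || ext_cat == some cat)).getD "other")

-- ===== PRECONDITION & SPEC =====
def Spec_identify_attachment_type (attachment : List (String × String)) (out : String) : Prop := out = identify_attachment_type_alt attachment
instance (attachment : List (String × String)) (out : String) : Decidable (Spec_identify_attachment_type attachment out) := by unfold Spec_identify_attachment_type; infer_instance

-- ===== CLAIM (what is proved, stated in full; the proofs are below) =====
def Claim_equal_identify_attachment_type : Prop := ∀ (attachment : List (String × String)), Dom_identify_attachment_type attachment → Spec_identify_attachment_type attachment (identify_attachment_type attachment)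

-- ===== LEMMAS AND PROOFS =====
-- the mime dict lookup, written as the priority-ordered if-chain over the three mime groups
set_option maxRecDepth 8192 in
lemma mime_lookup_eq (m : String) :
    PySem.Dict.get? pvMimeCategory m =
      (if (["text/plain", "text/markdown", "text/csv", "text/html",
            "application/json", "application/xml", "text/xml"] : List String).contains m then some "text"
       else if m == "application/pdf" then some "pdf"
       else if (["image/png", "image/jpeg", "image/jpg", "image/gif", "image/webp", "image/bmp"] : List String).contains m then some "image"
       else none) := by
  by_cases h1 : m = "text/plain"
  · subst h1; decide
  by_cases h2 : m = "text/markdown"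
  · subst h2; decide
  by_cases h3 : m = "text/csv"
  · subst h3; decide
  by_cases h4 : m = "text/html"
  · subst h4; decide
  by_cases h5 : m = "application/json"
  · subst h5; decide
  by_cases h6 : m = "application/xml"
  · subst h6; decide
  by_cases h7 : m = "text/xml"
  · subst h7; decide
  by_cases h8 : m = "application/pdf"
  · subst h8; decide
  by_cases h9 : m = "image/png"
  · subst h9; decide
  by_cases h10 : m = "image/jpeg"
  · subst h10; decide
  by_cases h11 : m = "image/jpg"
  · subst h11; decide
  by_cases h12 : m = "image/gif"
  · subst h12; decide
  by_cases h13 : m = "image/webp"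
  · subst h13; decide
  by_cases h14 : m = "image/bmp"
  · subst h14; decide
  simp [pvMimeCategory, PySem.Dict.get?, Ne.symm h1, Ne.symm h2, Ne.symm h3, Ne.symm h4, Ne.symm h5, Ne.symm h6, Ne.symm h7, Ne.symm h8, Ne.symm h9, Ne.symm h10, Ne.symm h11, Ne.symm h12, Ne.symm h13, Ne.symm h14, h1, h2, h3, h4, h5, h6, h7, h8, h9, h10, h11, h12, h13, h14]

-- the extension table scan, written as the priority-ordered if-chain over the three extension groups
set_option maxRecDepth 8192 in
lemma ext_lookup_eq (f : String) :
    (pvExtCategory.find? (fun p => PySem.Str.endswith f p.1)).map (·.2) =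
      (if ([".txt", ".md", ".csv", ".json", ".xml", ".yaml", ".yml", ".log"] : List String).any (fun ext => PySem.Str.endswith f ext) then some "text"
       else if PySem.Str.endswith f ".pdf" then some "pdf"
       else if ([".png", ".jpg", ".jpeg", ".gif", ".webp", ".bmp"] : List String).any (fun ext => PySem.Str.endswith f ext) then some "image"
       else none) := by
  by_cases h1 : PySem.Str.endswith f ".txt" = true
  · simp_all [pvExtCategory]
  by_cases h2 : PySem.Str.endswith f ".md" = true
  · simp_all [pvExtCategory]
  by_cases h3 : PySem.Str.endswith f ".csv" = true
  · simp_all [pvExtCategory]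
  by_cases h4 : PySem.Str.endswith f ".json" = true
  · simp_all [pvExtCategory]
  by_cases h5 : PySem.Str.endswith f ".xml" = true
  · simp_all [pvExtCategory]
  by_cases h6 : PySem.Str.endswith f ".yaml" = true
  · simp_all [pvExtCategory]
  by_cases h7 : PySem.Str.endswith f ".yml" = true
  · simp_all [pvExtCategory]
  by_cases h8 : PySem.Str.endswith f ".log" = true
  · simp_all [pvExtCategory]
  by_cases h9 : PySem.Str.endswith f ".pdf" = true
  · simp_all [pvExtCategory]
  by_cases h10 : PySem.Str.endswith f ".png" = true
  · simp_all [pvExtCategory]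
  by_cases h11 : PySem.Str.endswith f ".jpg" = true
  · simp_all [pvExtCategory]
  by_cases h12 : PySem.Str.endswith f ".jpeg" = true
  · simp_all [pvExtCategory]
  by_cases h13 : PySem.Str.endswith f ".gif" = true
  · simp_all [pvExtCategory]
  by_cases h14 : PySem.Str.endswith f ".webp" = true
  · simp_all [pvExtCategory]
  by_cases h15 : PySem.Str.endswith f ".bmp" = true
  · simp_all [pvExtCategory]
  simp_all [pvExtCategory]

-- the abstract selection fact: A's if/return cascade equals the priority scan over the two if-chain lookups
lemma select_eq : ∀ tm te pm pe im ie : Bool,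
    (if tm || te then "text"
     else if pm || pe then "pdf"
     else if im || ie then "image"
     else "other")
    = ((pvPriority.find? (fun cat =>
          (if tm then some "text" else if pm then some "pdf" else if im then some "image" else none) == some cat ||
          (if te then some "text" else if pe then some "pdf" else if ie then some "image" else none) == some cat)).getD "other") := by
  decide

-- the two ports, after both have read the same mime/filename strings
lemma core_gen (m f : String) :
    (if (["text/plain", "text/markdown", "text/csv", "text/html",
          "application/json", "application/xml", "text/xml"] : List String).contains m
        || ([".txt", ".md", ".csv", ".json", ".xml", ".yaml", ".yml", ".log"] : List String).any (fun ext => PySem.Str.endswith f ext) then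
       "text"
     else if m == "application/pdf" || PySem.Str.endswith f ".pdf" then
       "pdf"
     else if (["image/png", "image/jpeg", "image/jpg", "image/gif", "image/webp", "image/bmp"] : List String).contains m
        || ([".png", ".jpg", ".jpeg", ".gif", ".webp", ".bmp"] : List String).any (fun ext => PySem.Str.endswith f ext) then
       "image"
     else
       "other")
    = ((pvPriority.find? (fun cat =>
          PySem.Dict.get? pvMimeCategory m == some cat ||
          (pvExtCategory.find? (fun p => PySem.Str.endswith f p.1)).map (·.2) == some cat)).getD "other") := by
  rw [mime_lookup_eq m, ext_lookup_eq f]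
  exact select_eq _ _ _ _ _ _

lemma core_eq (attachment : List (String × String)) :
    identify_attachment_type attachment = identify_attachment_type_alt attachment :=
  core_gen _ _

-- ===== VERDICT (by name: the statement is the Claim_ definition above) =====
theorem identify_attachment_type_spec : Claim_equal_identify_attachment_type := by
  intro attachment _
  unfold Spec_identify_attachment_type
  exact core_eq attachment
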